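-- pv_equiv track=rewrite | github.com/ACMISLab/PediaBench | scoring_calculation.py | get_department
-- ===== SOURCE A (Python) =====
-- def get_department(question_type):#按科室进行分类，每一类科室被分到一个二维列表中
--     departments=[]
--     department_types=[]
--     for question in question_type:
--         if question[1] in departments:
--             pass
--         else:
--             departments.append(question[1])
--     for i in departments:
--         department_types.append([])
--     for question in question_type:
--         i=departments.index(question[1])
--         department_types[i].append(question)
--     return department_types
-- ===== SOURCE B (Python) =====
-- def get_department(question_type):
--     # Single pass: maintain the groups directly; find a question's group by
--     # comparing with each group's representative key (group[0][1]).
--     result = []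
--     for question in question_type:
--         key = question[1]
--         for group in result:
--             if group[0][1] == key:
--                 group.append(question)
--                 break
--         else:
--             result.append([question])
--     return result
-- ===== Notes on version B (the rewrite author's own statement) =====
-- stated objective: simpler
-- what changed: Replaces A's three passes (collect distinct keys, prime empty buckets, re-scan with list.index) by one pass that maintains the grouped output directly, locating a question's group by its representative element's key.
import Mathlib
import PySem

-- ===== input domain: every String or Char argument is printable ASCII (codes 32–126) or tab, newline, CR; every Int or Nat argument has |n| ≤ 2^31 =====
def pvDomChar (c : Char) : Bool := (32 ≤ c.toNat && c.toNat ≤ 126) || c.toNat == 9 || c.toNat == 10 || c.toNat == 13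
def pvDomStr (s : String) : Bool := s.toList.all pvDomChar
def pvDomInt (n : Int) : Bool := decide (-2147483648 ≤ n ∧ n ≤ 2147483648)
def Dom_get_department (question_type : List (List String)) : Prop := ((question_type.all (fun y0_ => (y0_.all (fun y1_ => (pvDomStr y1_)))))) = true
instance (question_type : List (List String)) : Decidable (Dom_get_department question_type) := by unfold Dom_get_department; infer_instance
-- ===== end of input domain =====

-- B replaces A's three passes (collect keys, prime empty buckets, re-scan with list.index)
-- by one pass that maintains the grouped output directly (same output, similar cost).


-- question[1]; exact when the row has length ≥ 2 (guaranteed by Pre_)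
def pvKey (q : List String) : String := PySem.List.pyGetD q 1 ""

-- ===== PORT A =====
def get_department (question_type : List (List String)) : List (List (List String)) :=
  -- departments = []; for question: if question[1] in departments: pass else append
  let departments := question_type.foldl
    (fun deps q => if pvKey q ∈ deps then deps else deps ++ [pvKey q]) []
  -- for i in departments: department_types.append([])
  let department_types := departments.foldl
    (fun acc _ => acc ++ [([] : List (List String))]) []
  -- for question: i = departments.index(question[1]); department_types[i].append(question)
  -- index always succeeds (the key was inserted in the first loop), so getD 0 is never the fallback
  question_type.foldl
    (fun dt q => dt.modify ((PySem.List.index? departments (pvKey q)).getD 0) (fun g => g ++ [q]))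
    department_types

-- ===== PORT B =====
-- scan the groups: append to the group whose representative key group[0][1] equals key, else start a new group
def pvInsertGroup (q : List String) (key : String) (groups : List (List (List String))) :
    List (List (List String)) :=
  match groups with
  | [] => [[q]]
  | g :: rest =>
    if pvKey (PySem.List.pyGetD g 0 []) = key then (g ++ [q]) :: rest
    else g :: pvInsertGroup q key rest

def get_department_alt (question_type : List (List String)) : List (List (List String)) :=
  question_type.foldl (fun result q => pvInsertGroup q (pvKey q) result) []

-- ===== PRECONDITION & SPEC =====
-- Pre_ excludes rows with fewer than 2 entries: there both Pythons raise IndexError on question[1].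
def Pre_get_department (question_type : List (List String)) : Prop :=
  ∀ q ∈ question_type, 2 ≤ q.length
instance (question_type : List (List String)) : Decidable (Pre_get_department question_type) := by
  unfold Pre_get_department; infer_instance
def pvWitness_get_department : List (List String) :=
  [["q1", "cardio"], ["q2", "neuro"], ["q3", "cardio"]]

def Spec_get_department (question_type : List (List String)) (out : List (List (List String))) : Prop := out = get_department_alt question_type
instance (question_type : List (List String)) (out : List (List (List String))) : Decidable (Spec_get_department question_type out) := by unfold Spec_get_department; infer_instance

-- ===== CLAIM (what is proved, stated in full; the proofs are below) =====
def Claim_equal_get_department : Prop := ∀ (question_type : List (List String)), Dom_get_department question_type → Pre_get_department question_type → Spec_get_department question_type (get_department question_type)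

-- ===== LEMMAS AND PROOFS =====

-- canonical form: first-occurrence-ordered distinct keys, each mapped to its questions in order
def pvDeps (qt : List (List String)) : List String :=
  qt.foldl (fun deps q => if pvKey q ∈ deps then deps else deps ++ [pvKey q]) []

def pvC (qt : List (List String)) : List (List (List String)) :=
  (pvDeps qt).map (fun k => qt.filter (fun q => pvKey q == k))

theorem mem_foldl_deps (qt : List (List String)) (d0 : List String) (x : String) :
    x ∈ qt.foldl (fun deps q => if pvKey q ∈ deps then deps else deps ++ [pvKey q]) d0 ↔
      x ∈ d0 ∨ ∃ q ∈ qt, pvKey q = x := by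
  induction qt generalizing d0 with
  | nil => simp
  | cons q qt ih =>
    simp only [List.foldl_cons, ih, List.mem_cons]
    split_ifs with h
    · constructor
      · rintro (h1 | ⟨r, hr, hk⟩)
        · exact Or.inl h1
        · exact Or.inr ⟨r, Or.inr hr, hk⟩
      · rintro (h1 | ⟨r, rfl | hr, hk⟩)
        · exact Or.inl h1
        · exact Or.inl (hk ▸ h)
        · exact Or.inr ⟨r, hr, hk⟩
    · simp only [List.mem_append, List.mem_singleton]
      constructor
      · rintro ((h1 | h1) | ⟨r, hr, hk⟩)
        · exact Or.inl h1
        · exact Or.inr ⟨q, Or.inl rfl, h1.symm⟩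
        · exact Or.inr ⟨r, Or.inr hr, hk⟩
      · rintro (h1 | ⟨r, rfl | hr, hk⟩)
        · exact Or.inl (Or.inl h1)
        · exact Or.inl (Or.inr hk.symm)
        · exact Or.inr ⟨r, hr, hk⟩

theorem mem_pvDeps (qt : List (List String)) (x : String) :
    x ∈ pvDeps qt ↔ ∃ q ∈ qt, pvKey q = x := by
  simpa using mem_foldl_deps qt [] x

theorem nodup_foldl_deps (qt : List (List String)) (d0 : List String) (h : d0.Nodup) :
    (qt.foldl (fun deps q => if pvKey q ∈ deps then deps else deps ++ [pvKey q]) d0).Nodup := by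
  induction qt generalizing d0 with
  | nil => exact h
  | cons q qt ih =>
    simp only [List.foldl_cons]
    split_ifs with hm
    · exact ih d0 h
    · refine ih _ (h.append (List.nodup_singleton _) ?_)
      intro a ha hb
      rw [List.mem_singleton] at hb
      exact hm (hb ▸ ha)

theorem nodup_pvDeps (qt : List (List String)) : (pvDeps qt).Nodup :=
  nodup_foldl_deps qt [] List.nodup_nil

theorem pvDeps_append (ws : List (List String)) (q : List String) :
    pvDeps (ws ++ [q]) =
      if pvKey q ∈ pvDeps ws then pvDeps ws else pvDeps ws ++ [pvKey q] := by
  simp [pvDeps, List.foldl_append]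

-- representative key of the filtered bucket
theorem repKey_filter (l : List (List String)) (k : String) (h : ∃ q ∈ l, pvKey q = k) :
    pvKey (PySem.List.pyGetD (l.filter (fun q => pvKey q == k)) 0 []) = k := by
  obtain ⟨q, hq, hk⟩ := h
  have hmem : q ∈ l.filter (fun q => pvKey q == k) := List.mem_filter.2 ⟨hq, by simp [hk]⟩
  cases hf : l.filter (fun q => pvKey q == k) with
  | nil => rw [hf] at hmem; cases hmem
  | cons g t =>
    have hg : g ∈ l.filter (fun q => pvKey q == k) := by rw [hf]; exact List.mem_cons_self
    have := (List.mem_filter.1 hg).2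
    simp only [beq_iff_eq] at this
    simp [PySem.List.pyGetD_zero_cons, this]

-- B's scan over a keyed map of buckets
theorem pvInsertGroup_map (D : List String) (g : String → List (List String))
    (q : List String) (hnd : D.Nodup)
    (hrep : ∀ k ∈ D, pvKey (PySem.List.pyGetD (g k) 0 []) = k) :
    pvInsertGroup q (pvKey q) (D.map g) =
      if pvKey q ∈ D then D.map (fun k => if k = pvKey q then g k ++ [q] else g k)
      else D.map g ++ [[q]] := by
  induction D with
  | nil => simp [pvInsertGroup]
  | cons k D ih =>
    have hk := hrep k List.mem_cons_self
    simp only [List.map_cons, pvInsertGroup, hk]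
    by_cases hkey : k = pvKey q
    · subst hkey
      have hnot : pvKey q ∉ D := (List.nodup_cons.1 hnd).1
      rw [if_pos rfl, if_pos rfl, if_pos (List.mem_cons_self)]
      congr 1
      refine (List.map_congr_left ?_).symm
      intro x hx
      exact if_neg (fun h : x = pvKey q => hnot (h ▸ hx))
    · rw [if_neg hkey, ih (List.nodup_cons.1 hnd).2 (fun x hx => hrep x (List.mem_cons_of_mem _ hx))]
      have hne : pvKey q ≠ k := fun h => hkey h.symm
      by_cases hm : pvKey q ∈ D
      · simp [hm, hne, hkey]
      · simp [hm, hne]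

theorem alt_eq_pvC (qt : List (List String)) : get_department_alt qt = pvC qt := by
  induction qt using List.reverseRecOn with
  | nil => simp [get_department_alt, pvC, pvDeps]
  | append_singleton ws q ih =>
    have hstep : get_department_alt (ws ++ [q]) = pvInsertGroup q (pvKey q) (pvC ws) := by
      simp only [get_department_alt, List.foldl_append, List.foldl_cons, List.foldl_nil]
      rw [← ih]; rfl
    rw [hstep, pvC,
      pvInsertGroup_map (pvDeps ws) _ q (nodup_pvDeps ws)
        (fun k hk => repKey_filter ws k ((mem_pvDeps ws k).1 hk))]
    rw [pvC, pvDeps_append]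
    by_cases hm : pvKey q ∈ pvDeps ws
    · rw [if_pos hm, if_pos hm]
      refine List.map_congr_left ?_
      intro k hk
      rw [List.filter_append]
      by_cases hkq : k = pvKey q
      · subst hkq; simp
      · have : pvKey q ≠ k := fun h => hkq h.symm
        simp [this, hkq]
    · rw [if_neg hm, if_neg hm, List.map_append]
      congr 1
      · refine List.map_congr_left ?_
        intro k hk
        have hkq : pvKey q ≠ k := fun h => hm (h ▸ hk)
        simp [List.filter_append, hkq]
      · have hempty : ws.filter (fun r => pvKey r == pvKey q) = [] := by
          rw [List.filter_eq_nil_iff]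
          intro r hr
          simp only [beq_iff_eq]
          exact fun h => hm ((mem_pvDeps ws (pvKey q)).2 ⟨r, hr, h⟩)
        simp [List.filter_append, hempty]

-- A's indexed update on a keyed map of buckets
theorem modify_index_map (D : List String) (g : String → List (List String))
    (q : List String) (key : String) (hnd : D.Nodup) (hmem : key ∈ D) :
    (D.map g).modify ((PySem.List.index? D key).getD 0) (fun G => G ++ [q]) =
      D.map (fun k => if k = key then g k ++ [q] else g k) := by
  induction D with
  | nil => cases hmem
  | cons k D ih =>
    by_cases hk : k = key
    · subst hk
      have hnot : k ∉ D := (List.nodup_cons.1 hnd).1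
      rw [PySem.List.index?_cons_self]
      simp only [Option.getD_some, List.map_cons, List.modify_zero_cons, if_pos rfl]
      congr 1
      refine (List.map_congr_left ?_).symm
      intro x hx
      exact if_neg (fun h : x = k => hnot (h ▸ hx))
    · have hmem' : key ∈ D := by
        rcases List.mem_cons.1 hmem with h | h
        · exact absurd h.symm hk
        · exact h
      obtain ⟨i, hi⟩ := Option.isSome_iff_exists.1 ((PySem.List.index?_isSome_iff D key).2 hmem')
      rw [PySem.List.index?_cons_of_ne (xs := D) (v := key) hk, hi]
      simp only [Option.map_some, Option.getD_some, List.map_cons, List.modify_succ_cons,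
        if_neg hk]
      congr 1
      have := ih (List.nodup_cons.1 hnd).2 hmem'
      rw [hi] at this
      simpa using this

theorem foldl_modify_map (ws : List (List String)) (D : List String)
    (g : String → List (List String)) (hnd : D.Nodup) (hks : ∀ q ∈ ws, pvKey q ∈ D) :
    ws.foldl
        (fun dt q => dt.modify ((PySem.List.index? D (pvKey q)).getD 0) (fun G => G ++ [q]))
        (D.map g) =
      D.map (fun k => g k ++ ws.filter (fun q => pvKey q == k)) := by
  induction ws generalizing g with
  | nil => simp
  | cons q ws ih =>
    simp only [List.foldl_cons]
    rw [modify_index_map D g q (pvKey q) hnd (hks q List.mem_cons_self),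
      ih _ (fun r hr => hks r (List.mem_cons_of_mem _ hr))]
    refine List.map_congr_left ?_
    intro k hk
    by_cases hkq : k = pvKey q
    · subst hkq; simp [List.filter_cons, List.append_assoc]
    · have h2 : ¬ pvKey q = k := fun h => hkq h.symm
      simp [List.filter_cons, h2, hkq]

theorem a_eq_pvC (qt : List (List String)) : get_department qt = pvC qt := by
  show qt.foldl
      (fun dt q => dt.modify ((PySem.List.index? (pvDeps qt) (pvKey q)).getD 0) (fun G => G ++ [q]))
      ((pvDeps qt).foldl (fun acc _ => acc ++ [([] : List (List String))]) []) = _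
  rw [PySem.List.foldl_append_singleton_eq_map (f := fun _ => ([] : List (List String)))]
  simp only [List.nil_append]
  rw [foldl_modify_map qt (pvDeps qt) (fun _ => []) (nodup_pvDeps qt)
    (fun q hq => (mem_pvDeps qt (pvKey q)).2 ⟨q, hq, rfl⟩)]
  simp [pvC]

-- ===== VERDICT (by name: the statement is the Claim_ definition above) =====
theorem get_department_spec : Claim_equal_get_department := by
  intro qt _ _
  show get_department qt = get_department_alt qt
  rw [a_eq_pvC, alt_eq_pvC]
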